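-- pv_equiv track=rewrite | github.com/mxcezl/Constraint-Satisfaction-Problem | libs/CSPSolver.py | _is_value_valid_for_constraints
-- ===== SOURCE A (Python) =====
-- def _is_value_valid_for_constraints(value, variable, assignments, constraints):
--     constraints = {constraint: constraints[constraint] for constraint in constraints if variable in constraint}
--
--     if not constraints:
--         return True
--
--     found_constraint_not_satisfied = False
--     for constraint in constraints:
--         index_other_variable = 0 if constraint[1] == variable else 1
--         other_variable = constraint[index_other_variable] if constraint[index_other_variable] == variable else constraint[index_other_variable]
--         new_tuple_formed = (assignments[other_variable], value) if index_other_variable == 0 else (value, assignments[other_variable])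
--
--         if None in new_tuple_formed:
--             continue
--
--         if new_tuple_formed not in constraints[constraint]:
--             found_constraint_not_satisfied = True
--
--     return not found_constraint_not_satisfied
-- ===== SOURCE B (Python) =====
-- def _candidates(variable, assignments, constraints, v1, v2):
--     """Candidate values for `variable` under constraint (v1, v2), or None if the
--     constraint does not restrict it (irrelevant, or other variable unassigned)."""
--     pairs = constraints[(v1, v2)]
--     if v2 == variable:
--         other = assignments[v1]
--         if other is None:
--             return None
--         return {b for a, b in pairs if a == other}
--     if v1 == variable:
--         other = assignments[v2]
--         if other is None:
--             return None
--         return {a for a, b in pairs if b == other}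
--     return None
--
--
-- def _is_value_valid_for_constraints(value, variable, assignments, constraints):
--     allowed = None
--     for v1, v2 in constraints:
--         cand = _candidates(variable, assignments, constraints, v1, v2)
--         if cand is not None:
--             allowed = cand if allowed is None else allowed & cand
--     return allowed is None or value in allowed
-- ===== Notes on version B (the rewrite author's own statement) =====
-- stated objective: alternative
-- what changed: Instead of testing each oriented value pair against its relation, B computes for each relevant constraint the set of candidate values allowed for the variable (projecting the relation through the other variable's assignment), intersects these sets across constraints, and finally does one membership test of value in the intersection.
import Mathlib
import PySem

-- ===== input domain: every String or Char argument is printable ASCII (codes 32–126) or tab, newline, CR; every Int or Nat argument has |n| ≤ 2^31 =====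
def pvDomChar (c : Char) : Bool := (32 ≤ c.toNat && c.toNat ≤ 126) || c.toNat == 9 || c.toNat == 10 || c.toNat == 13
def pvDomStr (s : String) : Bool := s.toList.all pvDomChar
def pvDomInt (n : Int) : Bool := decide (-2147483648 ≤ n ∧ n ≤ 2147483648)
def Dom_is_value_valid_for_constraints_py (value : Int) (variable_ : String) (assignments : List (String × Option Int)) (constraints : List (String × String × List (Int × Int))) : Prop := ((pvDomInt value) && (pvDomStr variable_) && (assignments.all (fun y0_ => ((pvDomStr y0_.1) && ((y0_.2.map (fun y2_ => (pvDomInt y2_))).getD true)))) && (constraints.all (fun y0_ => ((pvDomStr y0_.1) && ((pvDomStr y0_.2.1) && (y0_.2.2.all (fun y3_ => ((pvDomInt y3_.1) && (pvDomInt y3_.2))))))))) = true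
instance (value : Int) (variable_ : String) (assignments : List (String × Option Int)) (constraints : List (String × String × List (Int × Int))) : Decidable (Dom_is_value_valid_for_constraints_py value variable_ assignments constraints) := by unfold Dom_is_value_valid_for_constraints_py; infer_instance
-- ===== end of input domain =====

-- B uses a different algorithm: it projects each relevant relation to the set of values allowed
-- for the variable, intersects these sets, and makes one final membership test (objective: alternative).

-- dict subscript d[k] (first-match lookup), shared primitive for both ports
def pvGetCon (cs : List (String × String × List (Int × Int))) (k : String × String) : Option (List (Int × Int)) :=
  (PySem.Dict.mk (cs.map (fun c => ((c.1, c.2.1), c.2.2)))).get? k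

def pvGetAsn (m : List (String × Option Int)) (k : String) : Option (Option Int) :=
  (PySem.Dict.mk m).get? k

-- ===== PORT A =====
def is_value_valid_for_constraints_py (value : Int) (variable_ : String) (assignments : List (String × Option Int)) (constraints : List (String × String × List (Int × Int))) : Bool :=
  -- constraints = {c: constraints[c] for c in constraints if variable in c}
  let filtered : List ((String × String) × List (Int × Int)) :=
    (constraints.filter (fun c => variable_ == c.1 || variable_ == c.2.1)).map
      (fun c => ((c.1, c.2.1), (pvGetCon constraints (c.1, c.2.1)).getD []))
  if filtered.isEmpty then true
  else
    let flag := filtered.foldl (fun flag kc =>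
      let idx0 : Bool := kc.1.2 == variable_               -- index_other_variable = 0 iff constraint[1] == variable
      let otherVal : Option Int := (pvGetAsn assignments (if idx0 then kc.1.1 else kc.1.2)).getD none
      let t : Option Int × Option Int := if idx0 then (otherVal, some value) else (some value, otherVal)
      if t.1 == none || t.2 == none then flag              -- None in new_tuple_formed: continue
      else if !(kc.2.any (fun p => ((some p.1 : Option Int), (some p.2 : Option Int)) == t)) then true
      else flag) false
    !flag

-- ===== PORT B =====
-- _candidates(variable, assignments, constraints, v1, v2) from Source B
def pvCand (variable_ : String) (assignments : List (String × Option Int)) (cs0 : List (String × String × List (Int × Int))) (v1 v2 : String) : Option (PySem.Set Int) :=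
  let pairs := (pvGetCon cs0 (v1, v2)).getD []
  if v2 == variable_ then
    match (pvGetAsn assignments v1).getD none with
    | none => none
    | some o => some (PySem.Set.ofList ((pairs.filter (fun p => p.1 == o)).map Prod.snd))
  else if v1 == variable_ then
    match (pvGetAsn assignments v2).getD none with
    | none => none
    | some o => some (PySem.Set.ofList ((pairs.filter (fun p => p.2 == o)).map Prod.fst))
  else none

def is_value_valid_for_constraints_py_alt (value : Int) (variable_ : String) (assignments : List (String × Option Int)) (constraints : List (String × String × List (Int × Int))) : Bool :=
  let allowed := constraints.foldl (fun allowed c =>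
    match pvCand variable_ assignments constraints c.1 c.2.1 with
    | none => allowed
    | some cand =>
      some (match allowed with
            | none => cand
            | some s => PySem.Set.inter s cand)) (none : Option (PySem.Set Int))
  match allowed with
  | none => true
  | some s => PySem.Set.contains s value

-- ===== PRECONDITION & SPEC =====
-- Pre_ excludes exactly the inputs where Python A raises KeyError: some constraint mentioning
-- `variable` whose other variable is not a key of `assignments`.
def Pre_is_value_valid_for_constraints_py (value : Int) (variable_ : String) (assignments : List (String × Option Int)) (constraints : List (String × String × List (Int × Int))) : Prop :=
  ∀ c ∈ constraints, (variable_ = c.1 ∨ variable_ = c.2.1) →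
    (if c.2.1 = variable_ then c.1 else c.2.1) ∈ assignments.map Prod.fst
instance (value : Int) (variable_ : String) (assignments : List (String × Option Int)) (constraints : List (String × String × List (Int × Int))) : Decidable (Pre_is_value_valid_for_constraints_py value variable_ assignments constraints) := by unfold Pre_is_value_valid_for_constraints_py; infer_instance

def pvWitness_is_value_valid_for_constraints_py : Int × String × (List (String × Option Int)) × (List (String × String × List (Int × Int))) :=
  (0, "x", [("y", some 1)], [("x", "y", [(0, 1)])])

def Spec_is_value_valid_for_constraints_py (value : Int) (variable_ : String) (assignments : List (String × Option Int)) (constraints : List (String × String × List (Int × Int))) (out : Bool) : Prop := out = is_value_valid_for_constraints_py_alt value variable_ assignments constraints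
instance (value : Int) (variable_ : String) (assignments : List (String × Option Int)) (constraints : List (String × String × List (Int × Int))) (out : Bool) : Decidable (Spec_is_value_valid_for_constraints_py value variable_ assignments constraints out) := by unfold Spec_is_value_valid_for_constraints_py; infer_instance

-- ===== CLAIM (what is proved, stated in full; the proofs are below) =====
def Claim_equal_is_value_valid_for_constraints_py : Prop := ∀ (value : Int) (variable_ : String) (assignments : List (String × Option Int)) (constraints : List (String × String × List (Int × Int))), Dom_is_value_valid_for_constraints_py value variable_ assignments constraints → Pre_is_value_valid_for_constraints_py value variable_ assignments constraints → Spec_is_value_valid_for_constraints_py value variable_ assignments constraints (is_value_valid_for_constraints_py value variable_ assignments constraints)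

-- ===== LEMMAS AND PROOFS =====

-- "this constraint entry is violated", as tested inside A's loop
def pvBad (value : Int) (variable_ : String) (assignments : List (String × Option Int)) (kc : (String × String) × List (Int × Int)) : Bool :=
  let idx0 : Bool := kc.1.2 == variable_
  let otherVal : Option Int := (pvGetAsn assignments (if idx0 then kc.1.1 else kc.1.2)).getD none
  let t : Option Int × Option Int := if idx0 then (otherVal, some value) else (some value, otherVal)
  !(t.1 == none || t.2 == none) && !(kc.2.any (fun p => ((some p.1 : Option Int), (some p.2 : Option Int)) == t))

-- "this constraint entry is satisfied (or irrelevant)": common characterisation of both loops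
def pvOk (value : Int) (variable_ : String) (assignments : List (String × Option Int)) (cs0 : List (String × String × List (Int × Int))) (c : String × String × List (Int × Int)) : Bool :=
  if c.2.1 == variable_ then
    match (pvGetAsn assignments c.1).getD none with
    | none => true
    | some x => ((pvGetCon cs0 (c.1, c.2.1)).getD []).contains (x, value)
  else if c.1 == variable_ then
    match (pvGetAsn assignments c.2.1).getD none with
    | none => true
    | some x => ((pvGetCon cs0 (c.1, c.2.1)).getD []).contains (value, x)
  else true

-- value is allowed by the accumulator (None = unrestricted)
def pvP (value : Int) : Option (PySem.Set Int) → Bool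
  | none => true
  | some s => PySem.Set.contains s value

lemma pvP_combine (value : Int) (acc : Option (PySem.Set Int)) (cand : PySem.Set Int) :
    pvP value (some (match acc with | none => cand | some s => PySem.Set.inter s cand))
      = (pvP value acc && PySem.Set.contains cand value) := by
  cases acc with
  | none => simp [pvP]
  | some s =>
    simp only [pvP]
    rw [Bool.eq_iff_iff]
    simp only [Bool.and_eq_true, PySem.Set.contains_iff, PySem.Set.mem_inter]

lemma pvCand_contains (value : Int) (variable_ : String) (assignments : List (String × Option Int)) (cs0 : List (String × String × List (Int × Int))) (c : String × String × List (Int × Int)) :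
    (match pvCand variable_ assignments cs0 c.1 c.2.1 with
     | none => true
     | some cand => PySem.Set.contains cand value) = pvOk value variable_ assignments cs0 c := by
  obtain ⟨v1, v2, pairs⟩ := c
  simp only [pvCand, pvOk]
  by_cases h2 : v2 = variable_
  · subst h2
    cases hx : (pvGetAsn assignments v1).getD none with
    | none => simp [hx]
    | some x =>
      simp only [hx, beq_self_eq_true, if_true]
      rw [Bool.eq_iff_iff]
      simp only [PySem.Set.contains_iff, PySem.Set.mem_ofList, List.mem_map,
        List.mem_filter, List.contains_eq_mem, beq_iff_eq, decide_eq_true_eq]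
      constructor
      · rintro ⟨p, ⟨hp, h1⟩, h2⟩; cases p; simp_all
      · intro hm; exact ⟨(x, value), ⟨hm, rfl⟩, rfl⟩
  · by_cases h1 : v1 = variable_
    · subst h1
      simp only [beq_iff_eq, h2, if_false]
      cases hx : (pvGetAsn assignments v2).getD none with
      | none => simp [hx]
      | some x =>
        simp only [hx, beq_self_eq_true, if_true]
        rw [Bool.eq_iff_iff]
        simp only [PySem.Set.contains_iff, PySem.Set.mem_ofList, List.mem_map,
          List.mem_filter, List.contains_eq_mem, beq_iff_eq, decide_eq_true_eq]
        constructor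
        · rintro ⟨p, ⟨hp, hpb⟩, hpa⟩; cases p; simp_all
        · intro hm; exact ⟨(value, x), ⟨hm, rfl⟩, rfl⟩
    · simp [h1, h2]

lemma pvAltFold_eq_all (value : Int) (variable_ : String) (assignments : List (String × Option Int)) (cs0 : List (String × String × List (Int × Int))) (l : List (String × String × List (Int × Int))) (acc : Option (PySem.Set Int)) :
    pvP value (l.foldl (fun allowed c =>
      match pvCand variable_ assignments cs0 c.1 c.2.1 with
      | none => allowed
      | some cand =>
        some (match allowed with
              | none => cand
              | some s => PySem.Set.inter s cand)) acc)
      = (pvP value acc && l.all (pvOk value variable_ assignments cs0)) := by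
  induction l generalizing acc with
  | nil => simp
  | cons c rest ih =>
    rw [List.foldl_cons, List.all_cons, ih, ← pvCand_contains value variable_ assignments cs0 c]
    cases h : pvCand variable_ assignments cs0 c.1 c.2.1 with
    | none => simp
    | some cand => rw [pvP_combine, Bool.and_assoc]

lemma pvStep_eq (value : Int) (variable_ : String) (assignments : List (String × Option Int)) (b : Bool) (kc : (String × String) × List (Int × Int)) :
    (let idx0 : Bool := kc.1.2 == variable_
     let otherVal : Option Int := (pvGetAsn assignments (if idx0 then kc.1.1 else kc.1.2)).getD none
     let t : Option Int × Option Int := if idx0 then (otherVal, some value) else (some value, otherVal)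
     if t.1 == none || t.2 == none then b
     else if !(kc.2.any (fun p => ((some p.1 : Option Int), (some p.2 : Option Int)) == t)) then true
     else b) = (b || pvBad value variable_ assignments kc) := by
  cases b <;> simp only [pvBad] <;> split_ifs <;> simp_all [Option.isSome_iff_ne_none] <;> assumption

lemma pvFoldl_flag (value : Int) (variable_ : String) (assignments : List (String × Option Int)) (l : List ((String × String) × List (Int × Int))) (b : Bool) :
    l.foldl (fun flag kc =>
      let idx0 : Bool := kc.1.2 == variable_
      let otherVal : Option Int := (pvGetAsn assignments (if idx0 then kc.1.1 else kc.1.2)).getD none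
      let t : Option Int × Option Int := if idx0 then (otherVal, some value) else (some value, otherVal)
      if t.1 == none || t.2 == none then flag
      else if !(kc.2.any (fun p => ((some p.1 : Option Int), (some p.2 : Option Int)) == t)) then true
      else flag) b = (b || l.any (pvBad value variable_ assignments)) := by
  induction l generalizing b with
  | nil => simp
  | cons kc rest ih =>
    rw [List.foldl_cons, List.any_cons, pvStep_eq, ih, Bool.or_assoc]

lemma pvAnyPair (a b : Int) (pairs : List (Int × Int)) :
    (pairs.any (fun p => ((some p.1 : Option Int), (some p.2 : Option Int)) == (some a, some b)))
    = pairs.contains (a, b) := by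
  rw [Bool.eq_iff_iff]
  simp only [List.any_eq_true, List.contains_eq_mem, beq_iff_eq, Prod.mk.injEq, Option.some.injEq, decide_eq_true_eq]
  constructor
  · rintro ⟨p, hp, h1, h2⟩; subst h1; subst h2; simpa using hp
  · intro hm; exact ⟨(a, b), hm, rfl, rfl⟩

lemma pvBad_eq_not_ok (value : Int) (variable_ : String) (assignments : List (String × Option Int)) (constraints : List (String × String × List (Int × Int))) (c : String × String × List (Int × Int)) :
    ((variable_ == c.1 || variable_ == c.2.1) &&
      pvBad value variable_ assignments ((c.1, c.2.1), (pvGetCon constraints (c.1, c.2.1)).getD []))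
    = ! pvOk value variable_ assignments constraints c := by
  obtain ⟨v1, v2, pairs⟩ := c
  simp only [pvBad, pvOk]
  by_cases h2 : v2 = variable_
  · subst h2
    cases hx : (pvGetAsn assignments v1).getD none <;> simp [hx, pvAnyPair]
  · by_cases h1 : v1 = variable_
    · subst h1
      cases hx : (pvGetAsn assignments v2).getD none <;> simp [h2, hx, pvAnyPair]
    · have h1' : variable_ ≠ v1 := fun h => h1 h.symm
      have h2' : variable_ ≠ v2 := fun h => h2 h.symm
      simp [h1, h2, h1', h2']

-- ===== VERDICT (by name: the statement is the Claim_ definition above) =====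
theorem is_value_valid_for_constraints_py_spec : Claim_equal_is_value_valid_for_constraints_py := by
  intro value variable_ assignments constraints _dom _pre
  unfold Spec_is_value_valid_for_constraints_py
  unfold is_value_valid_for_constraints_py is_value_valid_for_constraints_py_alt
  rw [show (match constraints.foldl (fun allowed c =>
      match pvCand variable_ assignments constraints c.1 c.2.1 with
      | none => allowed
      | some cand =>
        some (match allowed with
              | none => cand
              | some s => PySem.Set.inter s cand)) (none : Option (PySem.Set Int)) with
    | none => true
    | some s => PySem.Set.contains s value)
    = pvP value (constraints.foldl (fun allowed c =>
      match pvCand variable_ assignments constraints c.1 c.2.1 with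
      | none => allowed
      | some cand =>
        some (match allowed with
              | none => cand
              | some s => PySem.Set.inter s cand)) (none : Option (PySem.Set Int))) from by
      cases (constraints.foldl _ _) <;> rfl]
  rw [pvAltFold_eq_all]
  simp only [pvP, Bool.true_and]
  simp only [pvFoldl_flag, List.any_map, List.any_filter, Bool.false_or, Function.comp]
  have hfun : (fun c : String × String × List (Int × Int) =>
      (variable_ == c.1 || variable_ == c.2.1) &&
        pvBad value variable_ assignments ((c.1, c.2.1), (pvGetCon constraints (c.1, c.2.1)).getD []))
      = (fun c => ! pvOk value variable_ assignments constraints c) :=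
    funext (pvBad_eq_not_ok value variable_ assignments constraints)
  rw [hfun]
  split_ifs with h
  · simp only [List.isEmpty_iff, List.map_eq_nil_iff, List.filter_eq_nil_iff] at h
    symm
    rw [List.all_eq_true]
    intro c hc
    have := h c hc
    simp only [Bool.or_eq_true, beq_iff_eq, not_or] at this
    obtain ⟨hA, hB⟩ := this
    have hA' : c.1 ≠ variable_ := fun hh => hA hh.symm
    have hB' : c.2.1 ≠ variable_ := fun hh => hB hh.symm
    simp [pvOk, hA', hB']
  · simp [List.all_eq_not_any_not]
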